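-- pv_equiv track=rewrite | github.com/rjwang1982/VSTECS_CloudClaw | enterprise/admin-console/server/test_playground.py | _read_func
-- ===== SOURCE A (Python) =====
-- def _read_func(content, func_name):
--     start = content.find(f"def {func_name}")
--     if start == -1:
--         return None
--     next_func = content.find("\ndef ", start + 1)
--     next_dec = content.find("\n@router", start + 1)
--     ends = [e for e in [next_func, next_dec] if e != -1]
--     end = min(ends) if ends else len(content)
--     return content[start:end]
-- ===== SOURCE B (Python) =====
-- def _read_func(content, func_name):
--     start = content.find("def " + func_name)
--     if start == -1:
--         return None
--     n = len(content)
--     end = n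
--     p = start + 1
--     while p < n:
--         tail = content[p:]
--         if tail.startswith("\ndef ") or tail.startswith("\n@router"):
--             end = p
--             break
--         p += 1
--     return content[start:end]
-- ===== Notes on version B (the rewrite author's own statement) =====
-- stated objective: alternative
-- what changed: B replaces A's two independent substring searches plus a filter/min combination by a single forward character scan from start+1 that stops at the first position whose suffix starts with "\ndef " or "\n@router".
import Mathlib
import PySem

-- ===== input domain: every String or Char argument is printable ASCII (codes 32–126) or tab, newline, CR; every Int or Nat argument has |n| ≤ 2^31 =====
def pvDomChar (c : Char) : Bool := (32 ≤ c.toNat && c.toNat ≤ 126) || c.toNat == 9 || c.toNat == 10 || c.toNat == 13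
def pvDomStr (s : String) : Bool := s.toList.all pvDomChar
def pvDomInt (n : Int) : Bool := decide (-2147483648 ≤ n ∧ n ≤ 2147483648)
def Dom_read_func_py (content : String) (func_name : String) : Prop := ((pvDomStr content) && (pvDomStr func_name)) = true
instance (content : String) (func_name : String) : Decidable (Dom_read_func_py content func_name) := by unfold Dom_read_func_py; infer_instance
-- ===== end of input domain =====

-- B replaces A's two independent substring searches plus filter/min by a single forward scan
-- from start+1 that stops at the first suffix starting with "\ndef " or "\n@router" (objective: alternative).

-- ===== PORT A =====
def read_func_py (content : String) (func_name : String) : Option String :=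
  let start := PySem.Str.find content ("def " ++ func_name)
  if start == -1 then none
  else
    let next_func := PySem.Str.findFrom content "\ndef " (start + 1) none
    let next_dec := PySem.Str.findFrom content "\n@router" (start + 1) none
    let ends := [next_func, next_dec].filter (fun e => e != -1)
    let endPos := match PySem.List.min? ends (fun e => e) with
      | some m => m
      | none => (PySem.Str.len content : Int)
    some (PySem.Str.slice content (some start) (some endPos))

-- ===== PORT B =====
-- the while-loop of Source B: first p in [p, n) whose suffix starts with either marker, else n
def scanEnd (l : List Char) (p : Nat) : Nat :=
  if _h : p < l.length then
    if PySem.Chars.startswith (l.drop p) "\ndef ".toList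
        || PySem.Chars.startswith (l.drop p) "\n@router".toList then p
    else scanEnd l (p + 1)
  else l.length
termination_by l.length - p

def read_func_py_alt (content : String) (func_name : String) : Option String :=
  let start := PySem.Str.find content ("def " ++ func_name)
  if start == -1 then none
  else
    let endPos := scanEnd content.toList (start.toNat + 1)
    some (PySem.Str.slice content (some start) (some (endPos : Int)))

-- ===== PRECONDITION & SPEC =====
def Spec_read_func_py (content : String) (func_name : String) (out : Option String) : Prop := out = read_func_py_alt content func_name
instance (content : String) (func_name : String) (out : Option String) : Decidable (Spec_read_func_py content func_name out) := by unfold Spec_read_func_py; infer_instance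

-- ===== CLAIM (what is proved, stated in full; the proofs are below) =====
def Claim_equal_read_func_py : Prop := ∀ (content : String) (func_name : String), Dom_read_func_py content func_name → Spec_read_func_py content func_name (read_func_py content func_name)

-- ===== LEMMAS AND PROOFS =====
theorem scanEnd_of_none (l : List Char) (p : Nat)
    (h : ∀ j, p ≤ j → ¬ ("\ndef ".toList <+: l.drop j ∨ "\n@router".toList <+: l.drop j)) :
    scanEnd l p = l.length := by
  rw [scanEnd]
  split
  · rw [if_neg, scanEnd_of_none l (p+1) (fun j hj => h j (by omega))]
    have h1 := h p le_rfl
    simp only [Bool.or_eq_true, PySem.Chars.startswith_iff]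
    tauto
  · rfl
termination_by l.length - p

theorem scanEnd_of_first (l : List Char) (p m : Nat) (hpm : p ≤ m)
    (hm : "\ndef ".toList <+: l.drop m ∨ "\n@router".toList <+: l.drop m)
    (hmin : ∀ j, p ≤ j → j < m → ¬ ("\ndef ".toList <+: l.drop j ∨ "\n@router".toList <+: l.drop j)) :
    scanEnd l p = m := by
  have hmlt : m < l.length := by
    by_contra hge
    have : l.drop m = [] := List.drop_eq_nil_of_le (by omega)
    rcases hm with hm | hm <;> · rw [this] at hm; simp [List.prefix_nil] at hm
  rw [scanEnd]
  rcases eq_or_lt_of_le hpm with rfl | hlt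
  · rw [dif_pos hmlt, if_pos]
    simp only [Bool.or_eq_true, PySem.Chars.startswith_iff]
    tauto
  · rw [dif_pos (by omega), if_neg, scanEnd_of_first l (p+1) m (by omega) hm (fun j hj => hmin j (by omega))]
    have h1 := hmin p le_rfl hlt
    simp only [Bool.or_eq_true, PySem.Chars.startswith_iff]
    tauto
termination_by l.length - p

theorem noOcc (l sub : List Char) (k : Nat) (h : ¬ sub <:+: l.drop k) :
    ∀ j, k ≤ j → ¬ sub <+: l.drop j := by
  intro j hj hp
  apply h
  have hd : l.drop j = (l.drop k).drop (j - k) := by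
    rw [List.drop_drop]; congr 1; omega
  rw [hd] at hp
  exact hp.isInfix.trans (List.drop_suffix _ _).isInfix


theorem main_eq (content func_name : String) :
    read_func_py content func_name = read_func_py_alt content func_name := by
  unfold read_func_py read_func_py_alt
  simp only [beq_iff_eq, PySem.Str.find_eq, PySem.Str.findFrom_eq]
  by_cases hfind : PySem.Chars.find content.toList ("def " ++ func_name).toList = -1
  · rw [if_pos hfind, if_pos hfind]
  · rw [if_neg hfind, if_neg hfind]
    set l := content.toList with hl
    set st := PySem.Chars.find l ("def " ++ func_name).toList with hst
    have hinf : ("def " ++ func_name).toList <:+: l := by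
      by_contra hc
      exact hfind ((PySem.Chars.find_eq_neg_one_iff l _).mpr hc)
    have h0 : 0 ≤ st := (PySem.Chars.find_nonneg_iff l _).mpr hinf
    set s : Nat := st.toNat with hs
    have hsInt : st = (s : Int) := (Int.toNat_of_nonneg h0).symm
    have hpref : ("def " ++ func_name).toList <+: l.drop s :=
      (PySem.Chars.find_spec (s := l) (sub := ("def " ++ func_name).toList) h0).1
    have hlen4 : 4 ≤ ("def " ++ func_name).toList.length := by
      simp [String.toList_append]
    have hk : s + 1 ≤ l.length := by
      have := hpref.length_le
      simp only [List.length_drop] at this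
      omega
    set k : Nat := s + 1 with hkdef
    have hkc : st + 1 = (k : Int) := by rw [hsInt, hkdef]; push_cast; ring
    set p1 : List Char := "\ndef ".toList with hp1
    set p2 : List Char := "\n@router".toList with hp2
    rw [hkc]
    set f1 := PySem.Chars.findFrom l p1 (k : Int) none with hf1
    set f2 := PySem.Chars.findFrom l p2 (k : Int) none with hf2
    suffices hend : (match PySem.List.min? ([f1, f2].filter (fun e => e != -1)) (fun e => e) with
        | some m => m
        | none => (PySem.Str.len content : Int)) = ((scanEnd l k : Nat) : Int) by
      rw [hend]
    by_cases h1 : f1 = -1 <;> by_cases h2 : f2 = -1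
    · have hn1 := noOcc l p1 k ((PySem.Chars.findFrom_natCast_eq_neg_one_iff l p1 k hk).mp h1)
      have hn2 := noOcc l p2 k ((PySem.Chars.findFrom_natCast_eq_neg_one_iff l p2 k hk).mp h2)
      have hscan : scanEnd l k = l.length := by
        apply scanEnd_of_none
        intro j hj hor
        rw [← hp1, ← hp2] at hor
        rcases hor with h | h
        · exact hn1 j hj h
        · exact hn2 j hj h
      rw [show List.filter (fun e => e != -1) [f1, f2] = [] from by simp [h1, h2]]
      show PySem.Str.len content = ((scanEnd l k : Nat) : Int)
      rw [hscan, hl]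
      simp
    · have hn1 := noOcc l p1 k ((PySem.Chars.findFrom_natCast_eq_neg_one_iff l p1 k hk).mp h1)
      obtain ⟨hk2, hpre2, hmin2⟩ := PySem.Chars.findFrom_natCast_spec l p2 k hk h2
      have hscan : scanEnd l k = f2.toNat := by
        apply scanEnd_of_first l k f2.toNat (by omega)
        · rw [← hp1, ← hp2]; exact Or.inr hpre2
        · intro j hj hjm hor
          rw [← hp1, ← hp2] at hor
          rcases hor with h | h
          · exact hn1 j hj h
          · exact hmin2 j hj hjm h
      rw [show List.filter (fun e => e != -1) [f1, f2] = [f2] from by simp [h1, h2],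
        PySem.List.min?_id_cons]
      show f2 = ((scanEnd l k : Nat) : Int)
      rw [hscan]
      omega
    · have hn2 := noOcc l p2 k ((PySem.Chars.findFrom_natCast_eq_neg_one_iff l p2 k hk).mp h2)
      obtain ⟨hk1, hpre1, hmin1⟩ := PySem.Chars.findFrom_natCast_spec l p1 k hk h1
      have hscan : scanEnd l k = f1.toNat := by
        apply scanEnd_of_first l k f1.toNat (by omega)
        · rw [← hp1, ← hp2]; exact Or.inl hpre1
        · intro j hj hjm hor
          rw [← hp1, ← hp2] at hor
          rcases hor with h | h
          · exact hmin1 j hj hjm h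
          · exact hn2 j hj h
      rw [show List.filter (fun e => e != -1) [f1, f2] = [f1] from by simp [h1, h2],
        PySem.List.min?_id_cons]
      show f1 = ((scanEnd l k : Nat) : Int)
      rw [hscan]
      omega
    · obtain ⟨hk1, hpre1, hmin1⟩ := PySem.Chars.findFrom_natCast_spec l p1 k hk h1
      obtain ⟨hk2, hpre2, hmin2⟩ := PySem.Chars.findFrom_natCast_spec l p2 k hk h2
      have hnn1 : (0:Int) ≤ f1 := by omega
      have hnn2 : (0:Int) ≤ f2 := by omega
      have hscan : scanEnd l k = (min f1 f2).toNat := by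
        apply scanEnd_of_first l k (min f1 f2).toNat (by omega)
        · rw [← hp1, ← hp2]
          rcases min_cases f1 f2 with ⟨hmeq, _⟩ | ⟨hmeq, _⟩
          · rw [hmeq]; exact Or.inl hpre1
          · rw [hmeq]; exact Or.inr hpre2
        · intro j hj hjm hor
          have hj1 : j < f1.toNat := by omega
          have hj2 : j < f2.toNat := by omega
          rw [← hp1, ← hp2] at hor
          rcases hor with h | h
          · exact hmin1 j hj hj1 h
          · exact hmin2 j hj hj2 h
      rw [show List.filter (fun e => e != -1) [f1, f2] = [f1, f2] from by simp [h1, h2],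
        PySem.List.min?_id_cons]
      show min f1 f2 = ((scanEnd l k : Nat) : Int)
      rw [hscan]
      omega


-- ===== VERDICT (by name: the statement is the Claim_ definition above) =====
theorem read_func_py_spec : Claim_equal_read_func_py := by
  intro content func_name _
  exact main_eq content func_name
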